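-- pv_equiv track=rewrite | github.com/AbdallahHesham44/z2Tools | partMask_comparetor/appnew.py | get_diff_chars
-- ===== SOURCE A (Python) =====
-- def get_diff_chars(part, masked):
--     diff = ''
--     max_len = max(len(part), len(masked))
--
--     for i in range(max_len):
--         p_char = part[i] if i < len(part) else ''
--         m_char = masked[i] if i < len(masked) else ''
--
--         if p_char != m_char:
--             diff += p_char
--
--     return diff if diff else 'no_diff'
-- ===== SOURCE B (Python) =====
-- def get_diff_chars(part, masked):
--     # Start from a full copy of part and DELETE the positions that match masked,
--     # scanning the overlap region backwards so deletions don't shift pending indices.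
--     out = list(part)
--     for i in range(min(len(part), len(masked)) - 1, -1, -1):
--         if part[i] == masked[i]:
--             del out[i]
--     return ''.join(out) if out else 'no_diff'
-- ===== Notes on version B (the rewrite author's own statement) =====
-- stated objective: alternative
-- what changed: Instead of accumulating differing characters left-to-right over range(max_len), B starts from a full copy of part and deletes the matching positions while scanning the overlap region backwards, so the tail past masked survives automatically.
import Mathlib
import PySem

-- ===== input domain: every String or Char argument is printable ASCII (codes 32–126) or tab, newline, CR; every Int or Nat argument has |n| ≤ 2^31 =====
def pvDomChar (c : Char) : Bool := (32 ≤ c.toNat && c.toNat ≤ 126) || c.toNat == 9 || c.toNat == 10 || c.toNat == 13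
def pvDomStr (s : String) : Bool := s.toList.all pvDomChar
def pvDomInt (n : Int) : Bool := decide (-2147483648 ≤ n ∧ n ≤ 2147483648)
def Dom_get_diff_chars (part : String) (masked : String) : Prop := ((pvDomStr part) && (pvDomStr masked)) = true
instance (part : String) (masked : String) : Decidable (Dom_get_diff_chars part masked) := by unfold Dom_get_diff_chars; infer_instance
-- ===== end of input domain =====

-- B is an alternative algorithm: instead of accumulating differing characters over
-- range(max_len), it deletes matched positions from a copy of part, scanning the
-- overlap backwards.


-- ===== PORT A =====
-- step of A's loop body: p_char/m_char are '' (here []) or a single char; append p_char when they differ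
def pvStepA (p m : List Char) (diff : List Char) (i : Nat) : List Char :=
  let pChar : List Char := if i < p.length then [p[i]!] else []
  let mChar : List Char := if i < m.length then [m[i]!] else []
  if pChar ≠ mChar then diff ++ pChar else diff

def get_diff_chars (part : String) (masked : String) : String :=
  let p := part.toList
  let m := masked.toList
  let maxLen := max p.length m.length
  let diff := (List.range maxLen).foldl (pvStepA p m) []
  if diff ≠ [] then String.ofList diff else "no_diff"

-- ===== PORT B =====
-- step of B's loop body: delete index i from out when part and masked agree there
def pvStepB (p m : List Char) (out : List Char) (i : Nat) : List Char :=
  if p[i]! = m[i]! then out.eraseIdx i else out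

def get_diff_chars_alt (part : String) (masked : String) : String :=
  let p := part.toList
  let m := masked.toList
  -- range(min-1, -1, -1) is the reverse of range(min)
  let out := ((List.range (min p.length m.length)).reverse).foldl (pvStepB p m) p
  if out ≠ [] then String.ofList out else "no_diff"

-- ===== PRECONDITION & SPEC =====
def Spec_get_diff_chars (part : String) (masked : String) (out : String) : Prop := out = get_diff_chars_alt part masked
instance (part : String) (masked : String) (out : String) : Decidable (Spec_get_diff_chars part masked out) := by unfold Spec_get_diff_chars; infer_instance

-- ===== CLAIM =====
def Claim_equal_get_diff_chars : Prop := ∀ (part : String) (masked : String), Dom_get_diff_chars part masked → Spec_get_diff_chars part masked (get_diff_chars part masked)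

-- ===== LEMMAS AND PROOFS =====

theorem pvStepA_nil_left (m d : List Char) (i : Nat) : pvStepA [] m d i = d := by
  unfold pvStepA
  simp only [List.length_nil, Nat.not_lt_zero, if_false]
  split <;> simp

theorem foldl_fixed_range (m : List Char) (d : List Char) (n : Nat) :
    (List.range n).foldl (pvStepA [] m) d = d := by
  induction n generalizing d with
  | zero => simp
  | succ k ih => rw [List.range_succ, List.foldl_append]; simp [pvStepA_nil_left, ih]

theorem pvStepA_shift (a b : Char) (p m : List Char) (d : List Char) (i : Nat) :
    pvStepA (a :: p) (b :: m) d (i + 1) = pvStepA p m d i := by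
  unfold pvStepA
  simp

theorem pvStepA_shift_nil (a : Char) (p : List Char) (d : List Char) (i : Nat) :
    pvStepA (a :: p) [] d (i + 1) = pvStepA p [] d i := by
  unfold pvStepA
  simp

-- canonical value: keep part's chars that differ positionally, plus part's tail
def pvSpecA : List Char → List Char → List Char
  | [], _ => []
  | p, [] => p
  | a :: p, b :: m => (if a ≠ b then [a] else []) ++ pvSpecA p m

theorem foldl_loopA (p m : List Char) (d : List Char) :
    (List.range (max p.length m.length)).foldl (pvStepA p m) d = d ++ pvSpecA p m := by
  induction p generalizing m d with
  | nil =>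
    rw [foldl_fixed_range]
    cases m <;> simp [pvSpecA]
  | cons a p ih =>
    cases m with
    | nil =>
      have h : max (a :: p).length ([] : List Char).length = p.length + 1 := by simp
      rw [h, List.range_succ_eq_map, List.foldl_cons, List.foldl_map]
      calc (List.range p.length).foldl (fun d i => pvStepA (a :: p) [] d (i + 1))
              (pvStepA (a :: p) [] d 0)
          = (List.range p.length).foldl (pvStepA p []) (pvStepA (a :: p) [] d 0) := by
            exact List.foldl_ext _ _ _ (fun acc x _ => pvStepA_shift_nil a p acc x)
        _ = (List.range (max p.length ([] : List Char).length)).foldl (pvStepA p [])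
              (pvStepA (a :: p) [] d 0) := by simp
        _ = pvStepA (a :: p) [] d 0 ++ pvSpecA p [] := ih [] _
        _ = d ++ pvSpecA (a :: p) [] := by
            unfold pvStepA
            cases p <;> simp [pvSpecA]
    | cons b m =>
      have h : max (a :: p).length (b :: m).length = max p.length m.length + 1 := by
        simp [Nat.succ_max_succ]
      rw [h, List.range_succ_eq_map, List.foldl_cons, List.foldl_map]
      calc (List.range (max p.length m.length)).foldl
              (fun d i => pvStepA (a :: p) (b :: m) d (i + 1)) (pvStepA (a :: p) (b :: m) d 0)
          = (List.range (max p.length m.length)).foldl (pvStepA p m)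
              (pvStepA (a :: p) (b :: m) d 0) := by
            exact List.foldl_ext _ _ _ (fun acc x _ => pvStepA_shift a b p m acc x)
        _ = pvStepA (a :: p) (b :: m) d 0 ++ pvSpecA p m := ih m _
        _ = d ++ pvSpecA (a :: p) (b :: m) := by
            unfold pvStepA
            by_cases hab : a = b <;> simp [pvSpecA, hab]

-- characters of part kept among the first n positions
def pvKeep (p m : List Char) (n : Nat) : List Char :=
  (((p.take n).zip (m.take n)).filter (fun pm => pm.1 ≠ pm.2)).map Prod.fst

-- B's backward loop on a base whose first n entries are p.take n
theorem foldl_loopB (p m : List Char) :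
    ∀ (n : Nat), n ≤ min p.length m.length → ∀ (t : List Char),
      ((List.range n).reverse).foldl (pvStepB p m) (p.take n ++ t) = pvKeep p m n ++ t := by
  intro n
  induction n with
  | zero => intro _ t; simp [pvKeep]
  | succ k ih =>
    intro hn t
    have hk : k ≤ min p.length m.length := Nat.le_of_succ_le hn
    have hp : k < p.length := lt_of_lt_of_le (Nat.lt_of_lt_of_le (Nat.lt_succ_self k) hn) (Nat.min_le_left _ _)
    have hm : k < m.length := lt_of_lt_of_le (Nat.lt_of_lt_of_le (Nat.lt_succ_self k) hn) (Nat.min_le_right _ _)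
    have htake : p.take (k + 1) = p.take k ++ [p[k]!] := by
      rw [List.take_add_one]
      simp [List.getElem?_eq_getElem hp, getElem!_pos p k hp]
    rw [List.range_succ, List.reverse_append, List.reverse_singleton, List.singleton_append,
      List.foldl_cons]
    have hstep : pvStepB p m (p.take (k + 1) ++ t) k
        = p.take k ++ ((if p[k]! ≠ m[k]! then [p[k]!] else []) ++ t) := by
      unfold pvStepB
      by_cases h : p[k]! = m[k]!
      · have hlen : (p.take k).length = k := List.length_take_of_le (Nat.le_of_lt hp)
        rw [if_pos h, htake, if_neg (by simp [h]), List.append_assoc, List.nil_append]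
        rw [List.eraseIdx_append_of_length_le (by omega)]
        simp [hlen]
      · rw [if_neg h, if_pos h, htake]
        simp
    rw [hstep, ih hk]
    have hkeep : pvKeep p m (k + 1) = pvKeep p m k ++ (if p[k]! ≠ m[k]! then [p[k]!] else []) := by
      unfold pvKeep
      have hmtake : m.take (k + 1) = m.take k ++ [m[k]!] := by
        rw [List.take_add_one]
        simp [List.getElem?_eq_getElem hm, getElem!_pos m k hm]
      have hzlen : (p.take k).length = (m.take k).length := by
        rw [List.length_take_of_le (Nat.le_of_lt hp), List.length_take_of_le (Nat.le_of_lt hm)]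
      rw [htake, hmtake, List.zip_append hzlen]
      by_cases h : p[k]! = m[k]!
      · simp [h, getElem!_pos m k hm]
      · simp [getElem!_pos p k hp, getElem!_pos m k hm]
        simp_all
    rw [hkeep, List.append_assoc]

-- canonical value equals the kept-overlap-plus-tail form
theorem pvSpecA_eq (p : List Char) (m : List Char) :
    pvSpecA p m = pvKeep p m (min p.length m.length) ++ p.drop (min p.length m.length) := by
  induction p generalizing m with
  | nil => cases m <;> simp [pvSpecA, pvKeep]
  | cons a p ih =>
    cases m with
    | nil => simp [pvSpecA, pvKeep]
    | cons b m =>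
      have : min (a :: p).length (b :: m).length = min p.length m.length + 1 := by
        simp [Nat.succ_min_succ]
      rw [this]
      by_cases hab : a = b <;> simp [pvSpecA, pvKeep, hab, ih]

-- B's loop on base p itself
theorem foldl_loopB_full (p m : List Char) :
    ((List.range (min p.length m.length)).reverse).foldl (pvStepB p m) p
      = pvKeep p m (min p.length m.length) ++ p.drop (min p.length m.length) := by
  have h := foldl_loopB p m (min p.length m.length) (le_refl _)
    (p.drop (min p.length m.length))
  rwa [List.take_append_drop] at h

-- ===== VERDICT =====
theorem get_diff_chars_spec : Claim_equal_get_diff_chars := by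
  intro part masked _
  simp only [Spec_get_diff_chars, get_diff_chars, get_diff_chars_alt]
  rw [foldl_loopA, List.nil_append, foldl_loopB_full, pvSpecA_eq]
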